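-- pv_equiv track=rewrite | github.com/robertrichards45/MCPD | app/app/routes/reference.py | _quick_incident_cards
-- ===== SOURCE A (Python) =====
-- PRIORITY_QUICK_INCIDENTS = (
--     'Domestic Disturbance',
--     'Traffic Accident',
--     'Assault',
--     'Shoplifting',
--     'Drug Possession',
--     'Suspicious Person',
--     'Vehicle Impound',
--     'Trespass After Warning',
-- )
--
-- def _quick_incident_cards(scenarios, limit=8):
--     by_title = {str(item.get('title') or '').strip().lower(): item for item in scenarios}
--     quick = []
--     for title in PRIORITY_QUICK_INCIDENTS:
--         found = by_title.get(title.lower())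
--         if found and found not in quick:
--             quick.append(found)
--     for scenario in scenarios:
--         if scenario not in quick:
--             quick.append(scenario)
--         if len(quick) >= limit:
--             break
--     return quick[:limit]
-- ===== SOURCE B (Python) =====
-- PRIORITY_QUICK_INCIDENTS = (
--     'Domestic Disturbance',
--     'Traffic Accident',
--     'Assault',
--     'Shoplifting',
--     'Drug Possession',
--     'Suspicious Person',
--     'Vehicle Impound',
--     'Trespass After Warning',
-- )
--
-- def _quick_incident_cards(scenarios, limit=8):
--     rank = {t.lower(): i for i, t in enumerate(PRIORITY_QUICK_INCIDENTS)}
--     chosen = {}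
--     for pos, item in enumerate(scenarios):
--         r = rank.get(str(item.get('title') or '').strip().lower())
--         if r is not None:
--             chosen[r] = pos
--     promoted = {pos: r for r, pos in chosen.items()}
--     p = len(PRIORITY_QUICK_INCIDENTS)
--     ordered = sorted(enumerate(scenarios), key=lambda pi: promoted.get(pi[0], p + pi[0]))
--     result = []
--     for _, item in ordered:
--         if item not in result:
--             result.append(item)
--         if len(result) >= limit:
--             break
--     return result[:limit]
-- ===== Notes on version B (the rewrite author's own statement) =====
-- stated objective: alternative
-- what changed: Replaces A's title-index dict plus two asymmetric append loops by a rank-annotate-and-stable-sort algorithm: one pass records the last position carrying each priority title, every position gets an integer sort key (its priority rank, or len(PRIORITY)+position), the enumerated scenarios are stably sorted by that key, and one dedup-and-cap pass over the sorted sequence produces the result.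
import Mathlib
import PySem

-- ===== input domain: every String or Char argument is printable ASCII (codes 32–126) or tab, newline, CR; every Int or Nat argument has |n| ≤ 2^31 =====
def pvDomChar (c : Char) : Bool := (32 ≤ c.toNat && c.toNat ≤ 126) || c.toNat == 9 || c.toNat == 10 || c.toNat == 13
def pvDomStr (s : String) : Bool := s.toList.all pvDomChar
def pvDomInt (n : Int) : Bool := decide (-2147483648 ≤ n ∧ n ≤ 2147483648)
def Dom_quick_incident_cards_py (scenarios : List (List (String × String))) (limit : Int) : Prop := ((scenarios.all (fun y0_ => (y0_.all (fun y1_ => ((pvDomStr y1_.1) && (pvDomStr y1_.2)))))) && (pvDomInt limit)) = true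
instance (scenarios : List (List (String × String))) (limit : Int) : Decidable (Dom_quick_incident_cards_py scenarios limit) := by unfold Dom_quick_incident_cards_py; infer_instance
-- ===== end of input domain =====

-- B replaces A's title-index dict plus two asymmetric append loops by a rank-annotate-and-stable-sort
-- algorithm: one pass over the scenarios records the last position bearing each priority title, each
-- position gets an integer sort key (priority rank, or len(PRIORITY)+position), the enumerated
-- scenarios are stably sorted by that key, and one dedup-and-cap pass over the sorted sequence
-- produces the result (objective: alternative; equivalence of RETURN values on nonnegative limit).

-- ===== PORT A =====
-- shared transliterations of source lines both Pythons contain verbatim: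
-- the priority-title tuple, dict equality (Python's `==`/`in` on dicts ignores pair order),
-- and the normalized-title expression str(item.get('title') or '').strip().lower().
def pvPriorityTitles : List String :=
  ["Domestic Disturbance", "Traffic Accident", "Assault", "Shoplifting",
   "Drug Possession", "Suspicious Person", "Vehicle Impound", "Trespass After Warning"]

def pvDictEq (x y : List (String × String)) : Bool :=
  let dx := PySem.Dict.ofList x
  let dy := PySem.Dict.ofList y
  dx.size == dy.size && dx.items.all (fun p => dy.get? p.1 == some p.2)

def pvMem (s : List (String × String)) (l : List (List (String × String))) : Bool :=
  l.any (fun q => pvDictEq q s)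

def pvNormTitle (item : List (String × String)) : String :=
  PySem.Str.lower (PySem.Str.strip (((PySem.Dict.ofList item).get? "title").getD ""))

-- A: by_title = {str(item.get('title') or '').strip().lower(): item for item in scenarios}
def pvByTitle (scenarios : List (List (String × String))) :
    PySem.Dict String (List (String × String)) :=
  scenarios.foldl (fun d item => d.insert (pvNormTitle item) item) PySem.Dict.empty

-- A's second loop: `for scenario in scenarios: … if len(quick) >= limit: break`
def pvLoopA (limit : Int) :
    List (List (String × String)) → List (List (String × String)) → List (List (String × String))
  | quick, [] => quick
  | quick, s :: rest =>
    let quick' := if pvMem s quick then quick else quick ++ [s]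
    if limit ≤ (quick'.length : Int) then quick' else pvLoopA limit quick' rest

def quick_incident_cards_py (scenarios : List (List (String × String))) (limit : Int) :
    List (List (String × String)) :=
  PySem.List.slice
    (pvLoopA limit
      (pvPriorityTitles.foldl (fun quick title =>
        match (pvByTitle scenarios).get? (PySem.Str.lower title) with
        | some found => if !found.isEmpty && !pvMem found quick then quick ++ [found] else quick
        | none => quick) [])
      scenarios)
    none (some limit)

-- ===== PORT B =====
-- B: rank = {t.lower(): i for i, t in enumerate(PRIORITY_QUICK_INCIDENTS)}
def pvRank : PySem.Dict String Int :=
  (PySem.List.enumerate pvPriorityTitles 0).foldl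
    (fun d it => d.insert (PySem.Str.lower it.2) it.1) PySem.Dict.empty

-- B: for pos, item in enumerate(scenarios): r = rank.get(norm); if r is not None: chosen[r] = pos
def pvChosen (scenarios : List (List (String × String))) : PySem.Dict Int Int :=
  (PySem.List.enumerate scenarios 0).foldl
    (fun d pi => match pvRank.get? (pvNormTitle pi.2) with
      | some r => d.insert r pi.1
      | none => d) PySem.Dict.empty

-- B: promoted = {pos: r for r, pos in chosen.items()}
def pvPromoted (scenarios : List (List (String × String))) : PySem.Dict Int Int :=
  (pvChosen scenarios).items.foldl (fun d rp => d.insert rp.2 rp.1) PySem.Dict.empty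

-- B: key=lambda pi: promoted.get(pi[0], p + pi[0])   with p = len(PRIORITY_QUICK_INCIDENTS)
def pvKey (scenarios : List (List (String × String))) (pi : Int × List (String × String)) : Int :=
  ((pvPromoted scenarios).get? pi.1).getD ((pvPriorityTitles.length : Int) + pi.1)

-- B's final loop: `for _, item in ordered: … if len(result) >= limit: break`
def pvLoopB (limit : Int) :
    List (List (String × String)) → List (Int × List (String × String)) → List (List (String × String))
  | result, [] => result
  | result, pi :: rest =>
    let result' := if pvMem pi.2 result then result else result ++ [pi.2]
    if limit ≤ (result'.length : Int) then result' else pvLoopB limit result' rest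

def quick_incident_cards_py_alt (scenarios : List (List (String × String))) (limit : Int) :
    List (List (String × String)) :=
  PySem.List.slice
    (pvLoopB limit []
      (PySem.List.sorted (PySem.List.enumerate scenarios 0) (pvKey scenarios) false))
    none (some limit)

-- ===== PRECONDITION & SPEC =====
-- `limit` is a card count; Pre_ excludes negative limits (outside the function's natural domain),
-- on which A's break-after-first-scenario interacts with the negative slice `quick[:limit]` to
-- return an accidental fragment that depends on A's loop shape.
def Pre_quick_incident_cards_py (scenarios : List (List (String × String))) (limit : Int) : Prop :=
  0 ≤ limit
instance (scenarios : List (List (String × String))) (limit : Int) : Decidable (Pre_quick_incident_cards_py scenarios limit) := by unfold Pre_quick_incident_cards_py; infer_instance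

def pvWitness_quick_incident_cards_py : (List (List (String × String))) × Int :=
  ([[("title", "Assault")], [("title", "x")]], 8)

def Spec_quick_incident_cards_py (scenarios : List (List (String × String))) (limit : Int) (out : List (List (String × String))) : Prop := out = quick_incident_cards_py_alt scenarios limit
instance (scenarios : List (List (String × String))) (limit : Int) (out : List (List (String × String))) : Decidable (Spec_quick_incident_cards_py scenarios limit out) := by unfold Spec_quick_incident_cards_py; infer_instance

-- ===== CLAIM (what is proved, stated in full; the proofs are below) =====
def Claim_equal_quick_incident_cards_py : Prop := ∀ (scenarios : List (List (String × String))) (limit : Int), Dom_quick_incident_cards_py scenarios limit → Pre_quick_incident_cards_py scenarios limit → Spec_quick_incident_cards_py scenarios limit (quick_incident_cards_py scenarios limit)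

-- ===== LEMMAS AND PROOFS =====

-- proof-side helpers: the pure dedup fold (no cap), item at an index, A's collected priority
-- items, and the two halves of the sorted sequence
def pvStep (q : List (List (String × String))) (s : List (String × String)) :
    List (List (String × String)) :=
  if pvMem s q then q else q ++ [s]

def pvDedup (q : List (List (String × String))) (xs : List (List (String × String))) :
    List (List (String × String)) :=
  xs.foldl pvStep q

def pvAt (scenarios : List (List (String × String))) (pos : Int) : List (String × String) :=
  (PySem.List.pyGet? scenarios pos).getD []

def pvCollect (d : PySem.Dict String (List (String × String))) (titles : List String) :
    List (List (String × String)) :=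
  titles.filterMap (fun t => match d.get? (PySem.Str.lower t) with
    | some f => if !f.isEmpty then some f else none
    | none => none)

def pvCP (scenarios : List (List (String × String))) : List (Int × List (String × String)) :=
  (List.range 8).filterMap (fun (k : Nat) =>
    ((pvChosen scenarios).get? ((k : Nat) : Int)).map (fun pos => (pos, pvAt scenarios pos)))

def pvRP (scenarios : List (List (String × String))) : List (Int × List (String × String)) :=
  (PySem.List.enumerate scenarios 0).filter
    (fun pi => !((pvPromoted scenarios).get? pi.1).isSome)

def pvLT (k : Nat) : String := PySem.Str.lower (pvPriorityTitles.getD k "")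

-- ## basic dedup lemmas
theorem pvDictEq_refl (x : List (String × String)) : pvDictEq x x = true := by
  simp only [pvDictEq, BEq.rfl, Bool.true_and, List.all_eq_true]
  intro p hp
  rw [PySem.Dict.get?_of_mem_items _ (by exact hp) (PySem.Dict.nodup_keys_ofList x)]
  simp

theorem pvMem_append (x : List (String × String)) (q t : List (List (String × String)))
    (h : pvMem x q = true) : pvMem x (q ++ t) = true := by
  simp only [pvMem, List.any_append, Bool.or_eq_true]
  exact Or.inl h

theorem pvMem_pvStep_self (q : List (List (String × String))) (x : List (String × String)) :
    pvMem x (pvStep q x) = true := by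
  unfold pvStep
  split
  · assumption
  · simp [pvMem, List.any_append, pvDictEq_refl]

theorem pvMem_pvStep (q : List (List (String × String))) (x y : List (String × String))
    (h : pvMem x q = true) : pvMem x (pvStep q y) = true := by
  unfold pvStep
  split
  · exact h
  · exact pvMem_append _ _ _ h

theorem pvDedup_suffix (xs : List (List (String × String)))
    (q : List (List (String × String))) : ∃ t, pvDedup q xs = q ++ t := by
  induction xs generalizing q with
  | nil => exact ⟨[], by simp [pvDedup]⟩
  | cons x r ih =>
    simp only [pvDedup, List.foldl_cons] at *
    unfold pvStep
    split
    · exact ih q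
    · obtain ⟨t, ht⟩ := ih (q ++ [x])
      exact ⟨x :: t, by simpa using ht⟩

theorem pvMem_pvDedup (xs : List (List (String × String)))
    (q : List (List (String × String))) (x : List (String × String))
    (h : pvMem x q = true) : pvMem x (pvDedup q xs) = true := by
  obtain ⟨t, ht⟩ := pvDedup_suffix xs q
  rw [ht]; exact pvMem_append _ _ _ h

theorem pvMem_pvDedup_of_mem (xs : List (List (String × String)))
    (q : List (List (String × String))) (x : List (String × String))
    (h : x ∈ xs) : pvMem x (pvDedup q xs) = true := by
  induction xs generalizing q with
  | nil => cases h
  | cons y r ih =>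
    simp only [pvDedup, List.foldl_cons]
    rcases List.mem_cons.mp h with rfl | hx
    · exact pvMem_pvDedup r _ _ (pvMem_pvStep_self q _)
    · exact ih _ hx

-- ## the cap: take limit of the capped loop = take limit of the full dedup
theorem pvTake_pvLoopA (limit : Int) (h : 0 ≤ limit)
    (xs : List (List (String × String))) (q : List (List (String × String))) :
    (pvLoopA limit q xs).take limit.toNat = (pvDedup q xs).take limit.toNat := by
  induction xs generalizing q with
  | nil => rfl
  | cons x r ih =>
    rw [show pvLoopA limit q (x :: r)
          = (if limit ≤ ((pvStep q x).length : Int) then pvStep q x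
             else pvLoopA limit (pvStep q x) r) from rfl,
        show pvDedup q (x :: r) = pvDedup (pvStep q x) r from rfl]
    by_cases hlen : limit ≤ ((pvStep q x).length : Int)
    · rw [if_pos hlen]
      obtain ⟨t, ht⟩ := pvDedup_suffix r (pvStep q x)
      rw [ht, List.take_append]
      have h0 : limit.toNat - (pvStep q x).length = 0 := by omega
      simp [h0]
    · rw [if_neg hlen]
      exact ih _

-- B's loop over (pos, item) pairs is A's loop over the items
theorem pvLoopB_eq_pvLoopA (limit : Int) (L : List (Int × List (String × String)))
    (q : List (List (String × String))) :
    pvLoopB limit q L = pvLoopA limit q (L.map (fun pi => pi.2)) := by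
  induction L generalizing q with
  | nil => rfl
  | cons pi r ih =>
    rw [show pvLoopB limit q (pi :: r)
          = (if limit ≤ ((pvStep q pi.2).length : Int) then pvStep q pi.2
             else pvLoopB limit (pvStep q pi.2) r) from rfl,
        List.map_cons,
        show pvLoopA limit q (pi.2 :: r.map (fun pi => pi.2))
          = (if limit ≤ ((pvStep q pi.2).length : Int) then pvStep q pi.2
             else pvLoopA limit (pvStep q pi.2) (r.map (fun pi => pi.2))) from rfl]
    by_cases hlen : limit ≤ ((pvStep q pi.2).length : Int) <;> simp [hlen, ih]

-- ## dropping already-seen positions from the dedup stream changes nothing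
theorem pvDedup_drop_seen (L : List (Int × List (String × String)))
    (p : Int × List (String × String) → Bool)
    (q : List (List (String × String)))
    (h : ∀ pi ∈ L, p pi = true → pvMem pi.2 q = true) :
    pvDedup q (L.map (fun pi => pi.2))
      = pvDedup q ((L.filter (fun pi => !p pi)).map (fun pi => pi.2)) := by
  induction L generalizing q with
  | nil => rfl
  | cons pi r ih =>
    simp only [List.map_cons, List.filter_cons]
    by_cases hp : p pi = true
    · have hq : pvStep q pi.2 = q := by
        unfold pvStep; rw [if_pos (h pi (List.mem_cons_self) hp)]
      simp only [hp, Bool.not_true, Bool.false_eq_true, if_false, pvDedup, List.foldl_cons]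
      rw [show pvStep q pi.2 = q from hq]
      exact ih q (fun x hx hpx => h x (List.mem_cons_of_mem _ hx) hpx)
    · simp only [hp, Bool.not_eq_true] at *
      simp only [Bool.not_false, if_true, List.map_cons, pvDedup, List.foldl_cons]
      exact ih (pvStep q pi.2)
        (fun x hx hpx => pvMem_pvStep _ _ _ (h x (List.mem_cons_of_mem _ hx) hpx))

-- ## last-wins characterisation of dict-building loops
theorem get?_foldl_insert_key {α κ ν : Type} [BEq κ] [LawfulBEq κ] (l : List α)
    (f : α → κ) (g : α → ν) (d : PySem.Dict κ ν) (k : κ) :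
    (l.foldl (fun d x => d.insert (f x) (g x)) d).get? k
      = (((l.filter (fun x => f x == k)).getLast?.map g).or (d.get? k)) := by
  induction l generalizing d with
  | nil => simp
  | cons a l ih =>
    simp only [List.foldl_cons, List.filter_cons]
    by_cases ha : f a = k
    · simp only [ha, BEq.rfl, if_true]
      rw [ih]
      cases hl : (l.filter (fun x => f x == k)).getLast? with
      | none =>
        rw [List.getLast?_eq_none_iff.mp hl]
        simp [PySem.Dict.get?_insert_self]
      | some b =>
        have hcons : (a :: l.filter (fun x => f x == k)).getLast? = some b := by
          cases hfl : l.filter (fun x => f x == k) with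
          | nil => rw [hfl] at hl; simp at hl
          | cons c t => rw [hfl] at hl; rw [List.getLast?_cons_cons]; exact hl
        rw [hcons]
        simp
    · have : (f a == k) = false := by simp [ha]
      simp only [this, Bool.false_eq_true, if_false]
      rw [ih, PySem.Dict.get?_insert_of_ne _ _ (fun h => ha h.symm)]

theorem byTitle_get (scenarios : List (List (String × String))) (t : String) :
    (pvByTitle scenarios).get? t
      = (scenarios.filter (fun it => pvNormTitle it == t)).getLast? := by
  unfold pvByTitle
  refine Eq.trans (get?_foldl_insert_key scenarios pvNormTitle (fun it => it)
    PySem.Dict.empty t) ?_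
  cases (scenarios.filter (fun it => pvNormTitle it == t)).getLast? <;>
    simp [PySem.Dict.get?_empty]

theorem chosen_fold_get (l : List (Int × List (String × String)))
    (d : PySem.Dict Int Int) (r : Int) :
    (l.foldl (fun d pi => match pvRank.get? (pvNormTitle pi.2) with
        | some rr => d.insert rr pi.1
        | none => d) d).get? r
      = (((l.filter (fun pi => pvRank.get? (pvNormTitle pi.2) == some r)).getLast?.map
            (fun pi => pi.1)).or (d.get? r)) := by
  induction l generalizing d with
  | nil => simp
  | cons a l ih =>
    simp only [List.foldl_cons, List.filter_cons]
    cases hr : pvRank.get? (pvNormTitle a.2) with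
    | none =>
      rw [ih]
      simp
    | some rr =>
      by_cases hrr : rr = r
      · subst hrr
        have : (some rr == some rr) = true := by simp
        simp only [this, if_true]
        rw [ih]
        cases hl : (l.filter (fun pi => pvRank.get? (pvNormTitle pi.2) == some rr)).getLast? with
        | none =>
          rw [List.getLast?_eq_none_iff.mp hl]
          simp [PySem.Dict.get?_insert_self]
        | some b =>
          have hcons : (a :: l.filter (fun pi => pvRank.get? (pvNormTitle pi.2) == some rr)).getLast?
              = some b := by
            cases hfl : l.filter (fun pi => pvRank.get? (pvNormTitle pi.2) == some rr) with
            | nil => rw [hfl] at hl; simp at hl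
            | cons c t => rw [hfl] at hl; rw [List.getLast?_cons_cons]; exact hl
          rw [hcons]
          simp
      · have : (some rr == some r) = false := by simp [hrr]
        simp only [this, Bool.false_eq_true, if_false]
        rw [ih, PySem.Dict.get?_insert_of_ne _ _ (fun h => hrr h.symm)]

theorem chosen_get (scenarios : List (List (String × String))) (r : Int) :
    (pvChosen scenarios).get? r
      = ((PySem.List.enumerate scenarios 0).filter
          (fun pi => pvRank.get? (pvNormTitle pi.2) == some r)).getLast?.map
            (fun pi => pi.1) := by
  unfold pvChosen
  refine Eq.trans (chosen_fold_get (PySem.List.enumerate scenarios 0)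
    PySem.Dict.empty r) ?_
  cases ((PySem.List.enumerate scenarios 0).filter
      (fun pi => pvRank.get? (pvNormTitle pi.2) == some r)).getLast? <;>
    simp [PySem.Dict.get?_empty]

theorem prom_get (scenarios : List (List (String × String))) (pos : Int) :
    (pvPromoted scenarios).get? pos
      = ((pvChosen scenarios).items.filter (fun rp => rp.2 == pos)).getLast?.map
          (fun rp => rp.1) := by
  unfold pvPromoted
  refine Eq.trans (get?_foldl_insert_key ((pvChosen scenarios).items)
    (fun rp => rp.2) (fun rp => rp.1) PySem.Dict.empty pos) ?_
  cases ((pvChosen scenarios).items.filter (fun rp => rp.2 == pos)).getLast? <;>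
    simp [PySem.Dict.get?_empty]

theorem nodup_keys_chosen (scenarios : List (List (String × String))) :
    (pvChosen scenarios).keys.Nodup := by
  unfold pvChosen
  generalize PySem.List.enumerate scenarios 0 = l
  have : ∀ (d : PySem.Dict Int Int), d.keys.Nodup →
      (l.foldl (fun d pi => match pvRank.get? (pvNormTitle pi.2) with
        | some rr => d.insert rr pi.1
        | none => d) d).keys.Nodup := by
    induction l with
    | nil => intro d h; exact h
    | cons a l ih =>
      intro d h
      simp only [List.foldl_cons]
      cases hr : pvRank.get? (pvNormTitle a.2) with
      | none => exact ih d h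
      | some rr => exact ih _ (PySem.Dict.nodup_keys_insert d rr a.1 h)
  exact this PySem.Dict.empty PySem.Dict.nodup_keys_empty

-- ## concrete facts about the rank dict
theorem rank_eval : pvRank = PySem.Dict.mk
    [("domestic disturbance", 0), ("traffic accident", 1), ("assault", 2), ("shoplifting", 3),
     ("drug possession", 4), ("suspicious person", 5), ("vehicle impound", 6),
     ("trespass after warning", 7)] := by decide

theorem rank_get_some {s : String} {r : Int} (h : pvRank.get? s = some r) :
    0 ≤ r ∧ r < 8 ∧ s = pvLT r.toNat := by
  rw [rank_eval] at h
  simp only [PySem.Dict.get?_mk_cons] at h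
  split_ifs at h with h1 h2 h3 h4 h5 h6 h7 h8 <;>
  [ (injection h with h0; subst h0;
     exact ⟨by decide, by decide, (eq_of_beq h1).symm.trans (by decide)⟩);
    (injection h with h0; subst h0;
     exact ⟨by decide, by decide, (eq_of_beq h2).symm.trans (by decide)⟩);
    (injection h with h0; subst h0;
     exact ⟨by decide, by decide, (eq_of_beq h3).symm.trans (by decide)⟩);
    (injection h with h0; subst h0;
     exact ⟨by decide, by decide, (eq_of_beq h4).symm.trans (by decide)⟩);
    (injection h with h0; subst h0;
     exact ⟨by decide, by decide, (eq_of_beq h5).symm.trans (by decide)⟩);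
    (injection h with h0; subst h0;
     exact ⟨by decide, by decide, (eq_of_beq h6).symm.trans (by decide)⟩);
    (injection h with h0; subst h0;
     exact ⟨by decide, by decide, (eq_of_beq h7).symm.trans (by decide)⟩);
    (injection h with h0; subst h0;
     exact ⟨by decide, by decide, (eq_of_beq h8).symm.trans (by decide)⟩);
    (simp [PySem.Dict.get?] at h) ]

theorem rank_get_LT (k : Nat) (hk : k < 8) : pvRank.get? (pvLT k) = some (k : Int) := by
  interval_cases k <;> decide

theorem pvLT_ne_empty (k : Nat) (hk : k < 8) : pvLT k ≠ "" := by
  interval_cases k <;> decide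

-- the rank-lookup test is the normalized-title test
theorem rank_test_eq (k : Nat) (hk : k < 8) (s : String) :
    (pvRank.get? s == some (k : Int)) = (s == pvLT k) := by
  cases hr : pvRank.get? s with
  | none =>
    cases hs : (s == pvLT k)
    · rfl
    · exfalso
      rw [eq_of_beq hs, rank_get_LT k hk] at hr
      cases hr
  | some r =>
    obtain ⟨h0, h8, hs⟩ := rank_get_some hr
    by_cases hkr : r = (k : Int)
    · subst hkr
      simp [hs, Int.toNat_natCast]
    · have : (some r == some (k : Int)) = false := by simp [hkr]
      rw [this]
      cases hsk : (s == pvLT k)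
      · rfl
      · exfalso
        rw [eq_of_beq hsk, rank_get_LT k hk] at hr
        injection hr with h0'
        exact hkr h0'.symm

-- ## facts about chosen / promoted
theorem chosen_get_some {scenarios : List (List (String × String))} {r pos : Int}
    (h : (pvChosen scenarios).get? r = some pos) :
    ∃ (j : Nat) (hj : j < scenarios.length), pos = (j : Int)
      ∧ pvRank.get? (pvNormTitle scenarios[j]) = some r := by
  rw [chosen_get] at h
  cases hl : ((PySem.List.enumerate scenarios 0).filter
      (fun pi => pvRank.get? (pvNormTitle pi.2) == some r)).getLast? with
  | none => rw [hl] at h; cases h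
  | some pi =>
    rw [hl] at h
    injection h with h
    have hmem := List.mem_of_getLast? hl
    rw [List.mem_filter] at hmem
    obtain ⟨hE, hpred⟩ := hmem
    obtain ⟨j, hj, hpi⟩ := (PySem.List.mem_enumerate_iff _ _ _).mp hE
    refine ⟨j, hj, ?_, ?_⟩
    · rw [← h, hpi]; simp
    · have : pi.2 = scenarios[j] := by rw [hpi]
      rw [← this]; exact eq_of_beq hpred

theorem chosen_inj {scenarios : List (List (String × String))} {r r' pos : Int}
    (h : (pvChosen scenarios).get? r = some pos)
    (h' : (pvChosen scenarios).get? r' = some pos) : r = r' := by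
  obtain ⟨j, hj, hpos, hr⟩ := chosen_get_some h
  obtain ⟨j', hj', hpos', hr'⟩ := chosen_get_some h'
  have : j = j' := by omega
  subst this
  exact Option.some.inj (hr.symm.trans hr')

theorem prom_get_some_iff (scenarios : List (List (String × String))) (pos r : Int) :
    (pvPromoted scenarios).get? pos = some r ↔ (pvChosen scenarios).get? r = some pos := by
  constructor
  · intro h
    rw [prom_get] at h
    cases hl : ((pvChosen scenarios).items.filter (fun rp => rp.2 == pos)).getLast? with
    | none => rw [hl] at h; cases h
    | some rp =>
      rw [hl] at h
      injection h with h
      have h' : rp.1 = r := h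
      have hmem := List.mem_of_getLast? hl
      rw [List.mem_filter] at hmem
      obtain ⟨hitems, hpred⟩ := hmem
      have h2 : (pvChosen scenarios).get? rp.1 = some rp.2 :=
        PySem.Dict.get?_of_mem_items _ (by exact hitems) (nodup_keys_chosen scenarios)
      rw [h', eq_of_beq hpred] at h2
      exact h2
  · intro h
    have hitems : (r, pos) ∈ (pvChosen scenarios).items :=
      PySem.Dict.mem_items_of_get?_eq_some _ h
    have hfil : (r, pos) ∈ (pvChosen scenarios).items.filter (fun rp => rp.2 == pos) := by
      rw [List.mem_filter]; exact ⟨hitems, by simp⟩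
    rw [prom_get]
    cases hl : ((pvChosen scenarios).items.filter (fun rp => rp.2 == pos)).getLast? with
    | none =>
      rw [List.getLast?_eq_none_iff] at hl
      rw [hl] at hfil; cases hfil
    | some rp =>
      have hmem := List.mem_of_getLast? hl
      rw [List.mem_filter] at hmem
      obtain ⟨hitems', hpred'⟩ := hmem
      have h2 : (pvChosen scenarios).get? rp.1 = some rp.2 :=
        PySem.Dict.get?_of_mem_items _ (by exact hitems') (nodup_keys_chosen scenarios)
      rw [eq_of_beq hpred'] at h2
      simp only [Option.map_some]
      rw [chosen_inj h2 h]

-- ## membership in the two halves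
theorem mem_pvCP_iff (scenarios : List (List (String × String)))
    (x : Int × List (String × String)) :
    x ∈ pvCP scenarios ↔ x ∈ PySem.List.enumerate scenarios 0
      ∧ ((pvPromoted scenarios).get? x.1).isSome = true := by
  constructor
  · intro h
    unfold pvCP at h
    obtain ⟨k, hk, hfk⟩ := List.mem_filterMap.mp h
    rw [List.mem_range] at hk
    cases hc : (pvChosen scenarios).get? (k : Int) with
    | none => rw [hc] at hfk; cases hfk
    | some pos =>
      rw [hc] at hfk
      injection hfk with hx
      obtain ⟨j, hj, hpos, _⟩ := chosen_get_some hc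
      constructor
      · rw [← hx]
        rw [PySem.List.mem_enumerate_iff]
        refine ⟨j, hj, ?_⟩
        simp only [pvAt, hpos, PySem.List.pyGet?_natCast, List.getElem?_eq_getElem hj]
        simp
      · rw [← hx]
        simp only
        rw [(prom_get_some_iff scenarios pos (k : Int)).mpr hc]
        rfl
  · rintro ⟨hE, hsome⟩
    cases hp : (pvPromoted scenarios).get? x.1 with
    | none => rw [hp] at hsome; cases hsome
    | some r =>
      have hc : (pvChosen scenarios).get? r = some x.1 :=
        (prom_get_some_iff scenarios x.1 r).mp hp
      obtain ⟨j, hj, hpos, hrank⟩ := chosen_get_some hc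
      obtain ⟨h0, h8, _⟩ := rank_get_some hrank
      unfold pvCP
      rw [List.mem_filterMap]
      refine ⟨r.toNat, by rw [List.mem_range]; omega, ?_⟩
      have hrr : ((r.toNat : Nat) : Int) = r := by omega
      rw [hrr, hc]
      have hat : pvAt scenarios x.1 = x.2 := by
        obtain ⟨j', hj', hx⟩ := (PySem.List.mem_enumerate_iff _ _ _).mp hE
        have hjj : x.1 = (j' : Int) := by rw [hx]; simp
        have hx2 : x.2 = scenarios[j'] := by rw [hx]
        rw [hjj, hx2]
        simp [pvAt, PySem.List.pyGet?_natCast, List.getElem?_eq_getElem hj']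
      simp [hat]

-- ## keys along the two halves
theorem key_pvCP_lt (scenarios : List (List (String × String)))
    (x : Int × List (String × String)) (h : x ∈ pvCP scenarios) :
    pvKey scenarios x < 8 ∧ ∃ r : Int, (pvPromoted scenarios).get? x.1 = some r
      ∧ pvKey scenarios x = r := by
  have := (mem_pvCP_iff scenarios x).mp h
  obtain ⟨hE, hsome⟩ := this
  cases hp : (pvPromoted scenarios).get? x.1 with
  | none => rw [hp] at hsome; cases hsome
  | some r =>
    have hc := (prom_get_some_iff scenarios x.1 r).mp hp
    obtain ⟨j, hj, hpos, hrank⟩ := chosen_get_some hc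
    obtain ⟨h0, h8, _⟩ := rank_get_some hrank
    have hkey : pvKey scenarios x = r := by simp [pvKey, hp]
    exact ⟨by rw [hkey]; omega, ⟨r, rfl, hkey⟩⟩

theorem key_pvRP_ge (scenarios : List (List (String × String)))
    (x : Int × List (String × String)) (h : x ∈ pvRP scenarios) :
    8 ≤ pvKey scenarios x ∧ pvKey scenarios x = 8 + x.1 := by
  rw [pvRP, List.mem_filter] at h
  obtain ⟨hE, hnone⟩ := h
  have hp : (pvPromoted scenarios).get? x.1 = none := by
    cases hp : (pvPromoted scenarios).get? x.1 with
    | none => rfl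
    | some r => rw [hp] at hnone; cases hnone
  obtain ⟨j, hj, hx⟩ := (PySem.List.mem_enumerate_iff _ _ _).mp hE
  have hx1 : x.1 = (j : Int) := by rw [hx]; simp
  have hkey : pvKey scenarios x = 8 + x.1 := by
    simp [pvKey, hp, pvPriorityTitles]
  refine ⟨?_, hkey⟩
  rw [hkey, hx1]
  omega

-- ## the sorted sequence is priority picks then the remaining positions
theorem pvCP_pairwise (scenarios : List (List (String × String))) :
    (pvCP scenarios).Pairwise (fun a b => pvKey scenarios a < pvKey scenarios b) := by
  unfold pvCP
  rw [List.pairwise_filterMap]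
  apply List.Pairwise.imp_of_mem ?_ List.pairwise_lt_range
  intro k k' hk hk' hlt x hx y hy
  rw [List.mem_range] at hk hk'
  cases hc : (pvChosen scenarios).get? (k : Int) with
  | none => rw [hc] at hx; cases hx
  | some pos =>
    rw [hc] at hx
    injection hx with hx
    cases hc' : (pvChosen scenarios).get? (k' : Int) with
    | none => rw [hc'] at hy; cases hy
    | some pos' =>
      rw [hc'] at hy
      injection hy with hy
      have hpx : (pvPromoted scenarios).get? pos = some (k : Int) :=
        (prom_get_some_iff _ _ _).mpr hc
      have hpy : (pvPromoted scenarios).get? pos' = some (k' : Int) :=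
        (prom_get_some_iff _ _ _).mpr hc'
      rw [← hx, ← hy]
      simp [pvKey, hpx, hpy]
      omega

theorem pvRP_pairwise (scenarios : List (List (String × String))) :
    (pvRP scenarios).Pairwise (fun a b => pvKey scenarios a < pvKey scenarios b) := by
  have hpair : (pvRP scenarios).Pairwise (fun p q => p.1 < q.1) := by
    unfold pvRP
    exact List.Pairwise.filter _ (PySem.List.pairwise_lt_enumerate scenarios 0)
  apply List.Pairwise.imp_of_mem ?_ hpair
  intro a b ha hb hlt
  obtain ⟨_, hka⟩ := key_pvRP_ge scenarios a ha
  obtain ⟨_, hkb⟩ := key_pvRP_ge scenarios b hb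
  rw [hka, hkb]; omega

theorem pvCP_RP_perm (scenarios : List (List (String × String))) :
    (pvCP scenarios ++ pvRP scenarios).Perm (PySem.List.enumerate scenarios 0) := by
  have hE : (PySem.List.enumerate scenarios 0).Nodup := by
    apply List.Pairwise.imp_of_mem ?_ (PySem.List.pairwise_lt_enumerate scenarios 0)
    intro a b _ _ hlt heq
    rw [heq] at hlt; omega
  have hperm := List.filter_append_perm
    (fun pi => ((pvPromoted scenarios).get? pi.1).isSome) (PySem.List.enumerate scenarios 0)
  have hCP : List.Perm (pvCP scenarios) ((PySem.List.enumerate scenarios 0).filter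
      (fun pi => ((pvPromoted scenarios).get? pi.1).isSome)) := by
    rw [List.perm_ext_iff_of_nodup ?_ (hE.filter _)]
    · intro x
      rw [mem_pvCP_iff, List.mem_filter]
    · have := pvCP_pairwise scenarios
      apply List.Pairwise.imp_of_mem ?_ this
      intro a b _ _ hlt heq
      rw [heq] at hlt; omega
  exact List.Perm.trans (hCP.append_right _) hperm

theorem sorted_char (scenarios : List (List (String × String))) :
    PySem.List.sorted (PySem.List.enumerate scenarios 0) (pvKey scenarios)
      = pvCP scenarios ++ pvRP scenarios := by
  apply PySem.List.sorted_eq_of_perm_of_pairwise_lt _ _ _ (pvCP_RP_perm scenarios)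
  rw [List.pairwise_append]
  refine ⟨pvCP_pairwise scenarios, pvRP_pairwise scenarios, ?_⟩
  intro a ha b hb
  obtain ⟨h8, _⟩ := key_pvCP_lt scenarios a ha
  obtain ⟨h8', _⟩ := key_pvRP_ge scenarios b hb
  omega

-- ## the priority picks carry exactly A's collected priority items
theorem pvCP_item (scenarios : List (List (String × String))) (k : Nat) (hk : k < 8) :
    Option.map (fun pi => pi.2)
        (((pvChosen scenarios).get? ((k : Nat) : Int)).map (fun pos => (pos, pvAt scenarios pos)))
      = match (pvByTitle scenarios).get? (pvLT k) with
        | some f => if !f.isEmpty then some f else none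
        | none => none := by
  rw [Option.map_map]
  have hcomp : ((fun pi : Int × List (String × String) => pi.2) ∘
      (fun pos => (pos, pvAt scenarios pos))) = (fun pos => pvAt scenarios pos) := rfl
  rw [hcomp, chosen_get]
  have hfe : (PySem.List.enumerate scenarios 0).filter
        (fun pi => pvRank.get? (pvNormTitle pi.2) == some (k : Int))
      = (PySem.List.enumerate scenarios 0).filter
        (fun pi => pvNormTitle pi.2 == pvLT k) :=
    List.filter_congr (fun pi _ => rank_test_eq k hk (pvNormTitle pi.2))
  have hbt : (pvByTitle scenarios).get? (pvLT k)
      = (((PySem.List.enumerate scenarios 0).filter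
          (fun pi => pvNormTitle pi.2 == pvLT k)).getLast?.map (fun pi => pi.2)) := by
    rw [byTitle_get]
    have : scenarios.filter (fun it => pvNormTitle it == pvLT k)
        = ((PySem.List.enumerate scenarios 0).filter
            (fun pi => pvNormTitle pi.2 == pvLT k)).map (fun pi => pi.2) := by
      conv_lhs => rw [← PySem.List.map_snd_enumerate scenarios 0]
      rw [List.filter_map]
      rfl
    rw [this, List.getLast?_map]
  rw [hfe, hbt]
  cases hl : ((PySem.List.enumerate scenarios 0).filter
      (fun pi => pvNormTitle pi.2 == pvLT k)).getLast? with
  | none => simp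
  | some pi =>
    have hmem := List.mem_of_getLast? hl
    rw [List.mem_filter] at hmem
    obtain ⟨hE, hpred⟩ := hmem
    obtain ⟨j, hj, hx⟩ := (PySem.List.mem_enumerate_iff _ _ _).mp hE
    have h1 : pi.1 = (j : Int) := by rw [hx]; simp
    have h2 : pi.2 = scenarios[j] := by rw [hx]
    have hat : pvAt scenarios pi.1 = pi.2 := by
      rw [h1, h2]
      simp [pvAt, PySem.List.pyGet?_natCast, List.getElem?_eq_getElem hj]
    have hne : pi.2.isEmpty = false := by
      cases hemp : pi.2 with
      | nil =>
        exfalso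
        rw [hemp] at hpred
        have : pvNormTitle [] = "" := by decide
        rw [this] at hpred
        exact pvLT_ne_empty k hk (eq_of_beq hpred).symm
      | cons a l => rfl
    simp only [Option.map_some, hat, hne, Bool.not_false, if_true]

theorem pvCP_map_snd (scenarios : List (List (String × String))) :
    (pvCP scenarios).map (fun pi => pi.2) = pvCollect (pvByTitle scenarios) pvPriorityTitles := by
  unfold pvCP pvCollect
  rw [List.map_filterMap]
  have h8 : List.range 8 = [0, 1, 2, 3, 4, 5, 6, 7] := by decide
  rw [h8]
  rw [show pvPriorityTitles = ["Domestic Disturbance", "Traffic Accident", "Assault",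
        "Shoplifting", "Drug Possession", "Suspicious Person", "Vehicle Impound",
        "Trespass After Warning"] from rfl]
  simp only [List.filterMap_cons, List.filterMap_nil]
  rw [show PySem.Str.lower "Domestic Disturbance" = pvLT 0 from by decide,
      show PySem.Str.lower "Traffic Accident" = pvLT 1 from by decide,
      show PySem.Str.lower "Assault" = pvLT 2 from by decide,
      show PySem.Str.lower "Shoplifting" = pvLT 3 from by decide,
      show PySem.Str.lower "Drug Possession" = pvLT 4 from by decide,
      show PySem.Str.lower "Suspicious Person" = pvLT 5 from by decide,
      show PySem.Str.lower "Vehicle Impound" = pvLT 6 from by decide,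
      show PySem.Str.lower "Trespass After Warning" = pvLT 7 from by decide]
  rw [pvCP_item scenarios 0 (by omega), pvCP_item scenarios 1 (by omega),
      pvCP_item scenarios 2 (by omega), pvCP_item scenarios 3 (by omega),
      pvCP_item scenarios 4 (by omega), pvCP_item scenarios 5 (by omega),
      pvCP_item scenarios 6 (by omega), pvCP_item scenarios 7 (by omega)]

-- ## A's priority loop is the dedup fold over the collected items
theorem pvPriorityFold_eq_dedup (d : PySem.Dict String (List (String × String)))
    (titles : List String) (q : List (List (String × String))) :
    titles.foldl (fun quick title =>
      match d.get? (PySem.Str.lower title) with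
      | some found => if !found.isEmpty && !pvMem found quick then quick ++ [found] else quick
      | none => quick) q = pvDedup q (pvCollect d titles) := by
  induction titles generalizing q with
  | nil => rfl
  | cons t r ih =>
    simp only [List.foldl_cons, pvCollect, List.filterMap_cons]
    cases hg : d.get? (PySem.Str.lower t) with
    | none => simpa [pvCollect] using ih q
    | some f =>
      by_cases hf : f.isEmpty
      · simp only [hf]
        simpa [pvCollect] using ih q
      · simp only [hf, Bool.not_false, Bool.true_and]
        have : (if !pvMem f q then q ++ [f] else q) = pvStep q f := by
          unfold pvStep
          by_cases hm : pvMem f q <;> simp [hm]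
        rw [this]
        simpa [pvCollect, pvDedup] using ih (pvStep q f)


-- ===== VERDICT (by name: the statement is the Claim_ definition above) =====
theorem quick_incident_cards_py_spec : Claim_equal_quick_incident_cards_py := by
  intro scenarios limit _ hpre
  unfold Spec_quick_incident_cards_py
  unfold Pre_quick_incident_cards_py at hpre
  unfold quick_incident_cards_py quick_incident_cards_py_alt
  rw [pvPriorityFold_eq_dedup, PySem.List.slice_to _ hpre, PySem.List.slice_to _ hpre,
      pvLoopB_eq_pvLoopA, pvTake_pvLoopA limit hpre, pvTake_pvLoopA limit hpre,
      sorted_char, List.map_append, pvCP_map_snd]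
  have hsplit : pvDedup [] (pvCollect (pvByTitle scenarios) pvPriorityTitles
        ++ (pvRP scenarios).map (fun pi => pi.2))
      = pvDedup (pvDedup [] (pvCollect (pvByTitle scenarios) pvPriorityTitles))
          ((pvRP scenarios).map (fun pi => pi.2)) := by
    unfold pvDedup
    rw [List.foldl_append]
  rw [hsplit]
  have hseen : ∀ pi ∈ PySem.List.enumerate scenarios 0,
      ((pvPromoted scenarios).get? pi.1).isSome = true →
      pvMem pi.2 (pvDedup [] (pvCollect (pvByTitle scenarios) pvPriorityTitles)) = true := by
    intro pi hpi hp
    have hCP : pi ∈ pvCP scenarios := (mem_pvCP_iff scenarios pi).mpr ⟨hpi, hp⟩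
    have hmap : pi.2 ∈ (pvCP scenarios).map (fun pi => pi.2) :=
      List.mem_map_of_mem hCP
    rw [pvCP_map_snd] at hmap
    exact pvMem_pvDedup_of_mem _ _ _ hmap
  have hdrop := pvDedup_drop_seen (PySem.List.enumerate scenarios 0)
    (fun pi => ((pvPromoted scenarios).get? pi.1).isSome)
    (pvDedup [] (pvCollect (pvByTitle scenarios) pvPriorityTitles)) hseen
  rw [PySem.List.map_snd_enumerate scenarios 0] at hdrop
  rw [hdrop]
  rfl
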